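-- pv_equiv track=rewrite | github.com/Marshal1101/DataStructure-Algorithm-Study | baekjoon/ImplementationQuestion2/073-1036-36진수.py | conv36to10
-- ===== SOURCE A (Python) =====
-- def conv36to10(num:str)->int:
--     nl = len(num)
--     deci = 0
--     for i in range(nl):
--         cn = ord(num[nl-1-i])
--         if cn > 64:
--             deci += (cn-55) * 36 ** i
--         else:
--             deci += (cn-48) * 36 ** i
--     return deci
-- ===== SOURCE B (Python) =====
-- def conv36to10(num: str) -> int:
--     # Horner's method: single left-to-right pass, no power computations.
--     deci = 0
--     for c in num:
--         cn = ord(c)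
--         deci = deci * 36 + (cn - 55 if cn > 64 else cn - 48)
--     return deci
-- ===== Notes on version B (the rewrite author's own statement) =====
-- stated objective: faster
-- what changed: Replaces the reversed-index loop that computes 36**i at every position with Horner's method (deci = deci*36 + digit) in one left-to-right pass.
import Mathlib
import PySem

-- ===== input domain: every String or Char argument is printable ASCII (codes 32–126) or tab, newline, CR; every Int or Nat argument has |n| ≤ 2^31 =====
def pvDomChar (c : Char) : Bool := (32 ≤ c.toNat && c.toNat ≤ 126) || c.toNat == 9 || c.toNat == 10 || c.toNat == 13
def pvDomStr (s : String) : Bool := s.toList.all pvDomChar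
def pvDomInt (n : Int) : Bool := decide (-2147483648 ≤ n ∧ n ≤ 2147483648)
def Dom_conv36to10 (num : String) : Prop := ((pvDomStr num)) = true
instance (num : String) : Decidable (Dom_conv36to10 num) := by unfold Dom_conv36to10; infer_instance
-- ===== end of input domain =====

-- B replaces A's reversed-index loop with per-digit powers 36**i by Horner's method
-- (deci = deci*36 + digit) in one left-to-right pass; objective: faster.


-- ===== PORT A =====
-- literal port: for i in range(nl): index num[nl-1-i] (always in range, so getD is exact),
-- add (cn-55)*36**i or (cn-48)*36**i
def conv36to10 (num : String) : Int :=
  let cs := num.toList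
  let nl := cs.length
  (List.range nl).foldl (fun deci i =>
    let cn : Int := ((cs.getD (nl - 1 - i) ' ').toNat : Int)
    if cn > 64 then deci + (cn - 55) * 36 ^ i else deci + (cn - 48) * 36 ^ i) 0

-- ===== PORT B =====
def conv36to10_alt (num : String) : Int :=
  num.toList.foldl (fun deci c =>
    let cn : Int := (c.toNat : Int)
    deci * 36 + (if cn > 64 then cn - 55 else cn - 48)) 0

-- ===== PRECONDITION & SPEC =====
def Spec_conv36to10 (num : String) (out : Int) : Prop := out = conv36to10_alt num
instance (num : String) (out : Int) : Decidable (Spec_conv36to10 num out) := by unfold Spec_conv36to10; infer_instance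

-- ===== CLAIM (what is proved, stated in full; the proofs are below) =====
def Claim_equal_conv36to10 : Prop := ∀ (num : String), Dom_conv36to10 num → Spec_conv36to10 num (conv36to10 num)

-- ===== LEMMAS AND PROOFS =====

def pvDigit (c : Char) : Int :=
  if (c.toNat : Int) > 64 then (c.toNat : Int) - 55 else (c.toNat : Int) - 48

-- Horner fold with an arbitrary accumulator
theorem pvHorner_acc (cs : List Char) (a : Int) :
    cs.foldl (fun d c => d * 36 + pvDigit c) a
      = a * 36 ^ cs.length + cs.foldl (fun d c => d * 36 + pvDigit c) 0 := by
  induction cs generalizing a with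
  | nil => simp
  | cons c t ih =>
    simp only [List.foldl_cons, List.length_cons]
    rw [ih (a * 36 + pvDigit c), ih (0 * 36 + pvDigit c)]
    ring

-- A's positional sum over range n equals the Horner fold
theorem pvSum_eq_horner (cs : List Char) :
    (List.range cs.length).foldl
        (fun d i => d + pvDigit (cs.getD (cs.length - 1 - i) ' ') * 36 ^ i) 0
      = cs.foldl (fun d c => d * 36 + pvDigit c) 0 := by
  rw [PySem.List.foldl_add]
  simp only [zero_add]
  induction cs with
  | nil => simp
  | cons c t ih =>
    have hlen : (c :: t).length = t.length + 1 := by simp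
    rw [hlen, List.range_succ, List.map_append, List.sum_append]
    have hmap : (List.range t.length).map
          (fun i => pvDigit ((c :: t).getD (t.length + 1 - 1 - i) ' ') * 36 ^ i)
        = (List.range t.length).map
          (fun i => pvDigit (t.getD (t.length - 1 - i) ' ') * 36 ^ i) := by
      apply List.map_congr_left
      intro i hi
      have hi' : i < t.length := List.mem_range.mp hi
      have h1 : t.length + 1 - 1 - i = (t.length - 1 - i) + 1 := by omega
      rw [h1]; rfl
    rw [hmap, ih]
    have h0 : t.length + 1 - 1 - t.length = 0 := by omega
    simp only [List.map_cons, List.map_nil, List.sum_cons, List.sum_nil, List.foldl_cons]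
    rw [h0]
    simp only [List.getD_cons_zero]
    rw [pvHorner_acc t (0 * 36 + pvDigit c)]
    ring

-- ===== VERDICT (by name: the statement is the Claim_ definition above) =====
theorem conv36to10_spec : Claim_equal_conv36to10 := by
  intro num _
  unfold Spec_conv36to10 conv36to10 conv36to10_alt
  simp only []
  have hA : (List.range num.toList.length).foldl
      (fun deci i =>
        let cn : Int := ((num.toList.getD (num.toList.length - 1 - i) ' ').toNat : Int)
        if cn > 64 then deci + (cn - 55) * 36 ^ i else deci + (cn - 48) * 36 ^ i) 0
      = (List.range num.toList.length).foldl
          (fun d i => d + pvDigit (num.toList.getD (num.toList.length - 1 - i) ' ') * 36 ^ i) 0 := by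
    apply PySem.List.foldl_congr_mem
    intro d i _
    simp only [pvDigit]
    split_ifs <;> ring
  have hB : num.toList.foldl
      (fun deci c =>
        let cn : Int := (c.toNat : Int)
        deci * 36 + (if cn > 64 then cn - 55 else cn - 48)) 0
      = num.toList.foldl (fun d c => d * 36 + pvDigit c) 0 := by
    simp only [pvDigit]
  rw [hA, hB, pvSum_eq_horner]
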